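-- pv_equiv track=rewrite | github.com/pypi-data/pypi-mirror-399 | packages/ygg/ygg-0.1.25.tar.gz/ygg-0.1.25/src/yggdrasil/pyutils/python_env.py | _split_on_tag
-- ===== SOURCE A (Python) =====
-- from typing import Any, Iterable, Iterator, Mapping, MutableMapping, Optional, Union, List
--
-- def _split_on_tag(stdout: str, tag: str) -> tuple[list[str], Optional[str]]:
--     lines = (stdout or "").splitlines()
--     before: list[str] = []
--     payload: Optional[str] = None
--     for line in lines:
--         if payload is None and line.startswith(tag):
--             payload = line[len(tag) :]
--             continue
--         if payload is None:
--             before.append(line)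
--     return before, payload
-- ===== SOURCE B (Python) =====
-- def _split_on_tag(stdout, tag):
--     lines = (stdout or "").splitlines()
--     for i, line in enumerate(lines):
--         if line.startswith(tag):
--             return lines[:i], line[len(tag):]
--     return lines, None
-- ===== Notes on version B (the rewrite author's own statement) =====
-- stated objective: simpler
-- what changed: Replaces the guarded element-by-element accumulation with state flags by a locate-first-tag-line-by-index loop that returns lines[:i] via slicing and the payload from the located line.
import Mathlib
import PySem

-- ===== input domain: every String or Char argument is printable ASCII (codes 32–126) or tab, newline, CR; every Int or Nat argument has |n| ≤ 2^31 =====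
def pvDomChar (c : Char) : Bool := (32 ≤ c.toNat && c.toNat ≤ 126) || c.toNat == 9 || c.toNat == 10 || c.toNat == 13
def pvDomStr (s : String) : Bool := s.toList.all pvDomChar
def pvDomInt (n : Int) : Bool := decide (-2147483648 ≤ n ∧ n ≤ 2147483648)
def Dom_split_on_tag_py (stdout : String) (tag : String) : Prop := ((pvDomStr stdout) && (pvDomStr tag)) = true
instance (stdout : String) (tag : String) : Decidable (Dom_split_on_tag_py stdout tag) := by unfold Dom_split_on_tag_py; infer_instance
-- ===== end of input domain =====

-- B replaces A's guarded accumulation (append-while-no-payload flags) by locate-the-first-tag-line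
-- by index, then slice lines[:i]; objective: simpler.

-- ===== PORT A =====
-- the loop body of A, one step per line on state (before, payload)
def pvAStep (tag : String) (st : List String × Option String) (line : String) :
    List String × Option String :=
  if st.2.isNone && PySem.Str.startswith line tag then
    (st.1, some (PySem.Str.slice line (some (PySem.Str.len tag)) none))
  else if st.2.isNone then (st.1 ++ [line], st.2)
  else st

def split_on_tag_py (stdout : String) (tag : String) : List String × Option String :=
  let lines := PySem.Str.splitlines stdout
  lines.foldl (pvAStep tag) ([], none)

-- ===== PORT B =====
-- the enumerate loop of B: first (index, line) with line.startswith(tag)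
def pvBFind (tag : String) : List String → Nat → Option (Nat × String)
  | [], _ => none
  | l :: ls, i => if PySem.Str.startswith l tag then some (i, l) else pvBFind tag ls (i + 1)

def split_on_tag_py_alt (stdout : String) (tag : String) : List String × Option String :=
  let lines := PySem.Str.splitlines stdout
  match pvBFind tag lines 0 with
  | some (i, line) =>
      (PySem.List.slice lines none (some (i : Int)),
       some (PySem.Str.slice line (some (PySem.Str.len tag)) none))
  | none => (lines, none)

-- ===== PRECONDITION & SPEC =====
def Spec_split_on_tag_py (stdout : String) (tag : String) (out : List String × Option String) : Prop := out = split_on_tag_py_alt stdout tag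
instance (stdout : String) (tag : String) (out : List String × Option String) : Decidable (Spec_split_on_tag_py stdout tag out) := by unfold Spec_split_on_tag_py; infer_instance

-- ===== CLAIM (what is proved, stated in full; the proofs are below) =====
def Claim_equal_split_on_tag_py : Prop := ∀ (stdout : String) (tag : String), Dom_split_on_tag_py stdout tag → Spec_split_on_tag_py stdout tag (split_on_tag_py stdout tag)

-- ===== LEMMAS AND PROOFS =====

-- once payload is set, A's loop never changes the state
theorem pvAStep_done (tag : String) (acc : List String) (p : String) (lines : List String) :
    lines.foldl (pvAStep tag) (acc, some p) = (acc, some p) := by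
  induction lines with
  | nil => rfl
  | cons l ls ih => simpa [pvAStep] using ih

theorem pvBFind_le (tag : String) (lines : List String) (k i : Nat) (l : String)
    (h : pvBFind tag lines k = some (i, l)) : k ≤ i := by
  induction lines generalizing k with
  | nil => simp [pvBFind] at h
  | cons x xs ih =>
    by_cases hx : PySem.Str.startswith x tag = true
    · rw [pvBFind, if_pos hx] at h
      simp at h; omega
    · rw [pvBFind, if_neg hx] at h
      exact Nat.le_of_succ_le (ih (k + 1) h)

-- the main invariant: A's fold from (acc, none) equals B's locate-then-slice, appended to acc
theorem pv_main (tag : String) (lines : List String) (acc : List String) (k : Nat) :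
    lines.foldl (pvAStep tag) (acc, none) =
      match pvBFind tag lines k with
      | some (i, l) =>
          (acc ++ lines.take (i - k),
           some (PySem.Str.slice l (some (PySem.Str.len tag)) none))
      | none => (acc ++ lines, none) := by
  induction lines generalizing acc k with
  | nil => simp [pvBFind]
  | cons l ls ih =>
    by_cases hl : PySem.Chars.startswith l.toList tag.toList = true
    · simp [pvBFind, hl, pvAStep, pvAStep_done]
    · have step : pvAStep tag (acc, none) l = (acc ++ [l], none) := by
        simp [pvAStep, hl]
      rw [List.foldl_cons, step, ih (acc ++ [l]) (k + 1)]
      simp only [pvBFind, PySem.Str.startswith_eq, hl]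
      cases hfind : pvBFind tag ls (k + 1) with
      | none => simp
      | some il =>
        obtain ⟨i, l'⟩ := il
        have hk : k + 1 ≤ i := pvBFind_le tag ls (k + 1) i l' hfind
        have : i - k = (i - (k + 1)) + 1 := by omega
        simp [this, List.take_succ_cons]

-- ===== VERDICT (by name: the statement is the Claim_ definition above) =====
theorem split_on_tag_py_spec : Claim_equal_split_on_tag_py := by
  intro stdout tag _
  unfold Spec_split_on_tag_py split_on_tag_py split_on_tag_py_alt
  rw [pv_main tag (PySem.Str.splitlines stdout) [] 0]
  cases hfind : pvBFind tag (PySem.Str.splitlines stdout) 0 with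
  | none => simp [hfind]
  | some il =>
    obtain ⟨i, l⟩ := il
    simp [hfind, PySem.List.slice_to_natCast]
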